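-- pv_equiv track=rewrite | github.com/carlos-moreno/algorithms | hypotenuse.py | is_hypotenuse
-- ===== SOURCE A (Python) =====
-- def is_hypotenuse(number: int) -> bool:
--     result = False
--     if number < 1:
--         return result
--     for i in range(1, number + 1):
--         for j in range(1, number + 1):
--             if pow(number, 2) == pow(i, 2) + pow(j, 2):
--                 result = True
--                 break
--     return result
-- ===== SOURCE B (Python) =====
-- def is_hypotenuse(number: int) -> bool:
--     # Two-pointer scan: find 1 <= i <= j with i*i + j*j == number*number in O(n).
--     target = number * number
--     i, j = 1, number - 1
--     while i <= j:
--         s = i * i + j * j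
--         if s == target:
--             return True
--         if s > target:
--             j -= 1
--         else:
--             i += 1
--     return False
-- ===== Notes on version B (the rewrite author's own statement) =====
-- stated objective: faster
-- what changed: Replaces the O(n^2) double loop over all (i,j) pairs with a two-pointer scan (i ascending, j descending) over i*i+j*j = number^2, O(n) time.
import Mathlib
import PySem

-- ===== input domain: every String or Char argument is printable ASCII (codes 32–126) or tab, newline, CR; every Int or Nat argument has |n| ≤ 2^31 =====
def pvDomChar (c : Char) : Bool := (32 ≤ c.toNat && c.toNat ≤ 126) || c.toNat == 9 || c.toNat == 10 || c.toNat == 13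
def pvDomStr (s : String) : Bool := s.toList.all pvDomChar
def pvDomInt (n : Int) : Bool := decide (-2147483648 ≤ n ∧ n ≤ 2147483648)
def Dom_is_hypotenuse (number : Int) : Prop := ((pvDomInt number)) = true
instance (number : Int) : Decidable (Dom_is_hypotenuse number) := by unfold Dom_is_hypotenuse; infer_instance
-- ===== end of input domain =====

-- Header: B replaces A's quadratic double loop with a linear two-pointer scan; return value proved equal on all inputs.

-- ===== PORT A =====
-- inner 'for j' loop: sets result to True (and breaks) when number^2 = i^2 + j^2
def isHypInner (n i : Int) (js : List Int) (r : Bool) : Bool :=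
  match js with
  | [] => r
  | j :: rest => if n ^ 2 = i ^ 2 + j ^ 2 then true else isHypInner n i rest r

def is_hypotenuse (number : Int) : Bool :=
  if number < 1 then false
  else
    (PySem.List.pyRange 1 (number + 1) 1).foldl
      (fun r i => isHypInner number i (PySem.List.pyRange 1 (number + 1) 1) r) false

-- ===== PORT B =====
-- two-pointer while loop of Source B
def isHypTwoPtr (target i j : Int) : Bool :=
  if h : i ≤ j then
    if i * i + j * j = target then true
    else if i * i + j * j > target then isHypTwoPtr target i (j - 1)
    else isHypTwoPtr target (i + 1) j
  else false
  termination_by (j - i + 1).toNat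
  decreasing_by all_goals simp_wf; omega

def is_hypotenuse_alt (number : Int) : Bool :=
  isHypTwoPtr (number * number) 1 (number - 1)

-- ===== PRECONDITION & SPEC =====
def Spec_is_hypotenuse (number : Int) (out : Bool) : Prop := out = is_hypotenuse_alt number
instance (number : Int) (out : Bool) : Decidable (Spec_is_hypotenuse number out) := by unfold Spec_is_hypotenuse; infer_instance

-- ===== CLAIM (what is proved, stated in full; the proofs are below) =====
def Claim_equal_is_hypotenuse : Prop := ∀ (number : Int), Dom_is_hypotenuse number → Spec_is_hypotenuse number (is_hypotenuse number)

-- ===== LEMMAS AND PROOFS =====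

theorem isHypInner_eq (n i : Int) (js : List Int) (r : Bool) :
    isHypInner n i js r = (js.any (fun j => n ^ 2 = i ^ 2 + j ^ 2) || r) := by
  induction js with
  | nil => simp [isHypInner]
  | cons j rest ih => by_cases h : n ^ 2 = i ^ 2 + j ^ 2 <;> simp [isHypInner, h, ih]

theorem foldl_or_any {α : Type} (g : α → Bool) (l : List α) (r : Bool) :
    l.foldl (fun r a => (g a || r)) r = (r || l.any g) := by
  induction l generalizing r with
  | nil => simp
  | cons a t ih => by_cases h : g a <;> simp [List.foldl, h, ih]

theorem is_hypotenuse_true_iff (n : Int) :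
    is_hypotenuse n = true ↔
      (¬ n < 1) ∧ ∃ i j : Int, (1 ≤ i ∧ i < n + 1) ∧ (1 ≤ j ∧ j < n + 1) ∧ n ^ 2 = i ^ 2 + j ^ 2 := by
  unfold is_hypotenuse
  by_cases h : n < 1
  · simp [h]
  · rw [if_neg h]
    have : ∀ r, (PySem.List.pyRange 1 (n + 1) 1).foldl
        (fun r i => isHypInner n i (PySem.List.pyRange 1 (n + 1) 1) r) r
        = (r || (PySem.List.pyRange 1 (n + 1) 1).any
            (fun i => (PySem.List.pyRange 1 (n + 1) 1).any fun j => n ^ 2 = i ^ 2 + j ^ 2)) := by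
      intro r
      rw [show (fun r i => isHypInner n i (PySem.List.pyRange 1 (n + 1) 1) r)
          = fun r i => ((PySem.List.pyRange 1 (n + 1) 1).any (fun j => n ^ 2 = i ^ 2 + j ^ 2) || r) from
          funext fun r => funext fun i => isHypInner_eq n i _ r]
      exact foldl_or_any _ _ r
    rw [this]
    simp only [Bool.false_or, List.any_eq_true, PySem.List.mem_pyRange_one, decide_eq_true_eq]
    constructor
    · rintro ⟨i, hi, j, hj, he⟩; exact ⟨h, i, j, hi, hj, he⟩
    · rintro ⟨_, i, j, hi, hj, he⟩; exact ⟨i, hi, j, hj, he⟩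

-- two squares are monotone on positives
theorem sq_mono {a b : Int} (h1 : 0 ≤ a) (h : a ≤ b) : a * a ≤ b * b :=
  mul_le_mul h h h1 (le_trans h1 h)

theorem isHypTwoPtr_true_iff (t : Int) : ∀ (i j : Int), 1 ≤ i →
    (isHypTwoPtr t i j = true ↔ ∃ a b : Int, i ≤ a ∧ a ≤ b ∧ b ≤ j ∧ a * a + b * b = t) := by
  intro i j
  induction i, j using isHypTwoPtr.induct t with
  | case1 i j hij heq =>
    intro _
    rw [isHypTwoPtr]
    simp only [dif_pos hij, if_pos heq, true_iff]
    exact ⟨i, j, le_refl _, hij, le_refl _, heq⟩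
  | case2 i j hij hne hgt ih =>
    intro h1
    rw [isHypTwoPtr]
    rw [dif_pos hij, if_neg hne, if_pos hgt, ih h1]
    constructor
    · rintro ⟨a, b, ha, hab, hb, he⟩; exact ⟨a, b, ha, hab, by omega, he⟩
    · rintro ⟨a, b, ha, hab, hb, he⟩
      refine ⟨a, b, ha, hab, ?_, he⟩
      -- b ≠ j: a pair with b = j would have a*a + j*j ≥ i*i + j*j > t
      rcases lt_or_eq_of_le hb with hlt | hbj
      · omega
      · exfalso
        subst hbj
        have : i * i ≤ a * a := sq_mono (by omega) ha
        omega
  | case3 i j hij hne hle ih =>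
    intro h1
    rw [isHypTwoPtr]
    rw [dif_pos hij, if_neg hne, if_neg hle, ih (by omega)]
    constructor
    · rintro ⟨a, b, ha, hab, hb, he⟩; exact ⟨a, b, by omega, hab, hb, he⟩
    · rintro ⟨a, b, ha, hab, hb, he⟩
      refine ⟨a, b, ?_, hab, hb, he⟩
      rcases lt_or_eq_of_le ha with hlt | hia
      · omega
      · exfalso
        subst hia
        have : b * b ≤ j * j := sq_mono (by omega) hb
        omega
  | case4 i j hij =>
    intro _
    rw [isHypTwoPtr]
    rw [dif_neg hij]
    simp only [Bool.false_eq_true, false_iff]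
    rintro ⟨a, b, ha, hab, hb, _⟩
    omega

theorem is_hypotenuse_alt_true_iff (n : Int) :
    is_hypotenuse_alt n = true ↔ ∃ a b : Int, 1 ≤ a ∧ a ≤ b ∧ b ≤ n - 1 ∧ a * a + b * b = n * n := by
  exact isHypTwoPtr_true_iff (n * n) 1 (n - 1) (le_refl 1)

theorem is_hypotenuse_eq (n : Int) : is_hypotenuse n = is_hypotenuse_alt n := by
  rw [Bool.eq_iff_iff, is_hypotenuse_true_iff, is_hypotenuse_alt_true_iff]
  constructor
  · rintro ⟨hn, i, j, ⟨hi1, hi2⟩, ⟨hj1, hj2⟩, he⟩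
    have he' : i * i + j * j = n * n := by ring_nf at he ⊢; omega
    -- wlog a ≤ b
    rcases le_total i j with hij | hij
    · refine ⟨i, j, hi1, hij, ?_, he'⟩
      have hii : 1 ≤ i * i := by nlinarith
      have : j * j < n * n := by omega
      nlinarith
    · refine ⟨j, i, hj1, hij, ?_, by omega⟩
      have hjj : 1 ≤ j * j := by nlinarith
      have : i * i < n * n := by omega
      nlinarith
  · rintro ⟨a, b, ha, hab, hb, he⟩
    have hn : ¬ n < 1 := by nlinarith
    refine ⟨hn, a, b, ⟨ha, by omega⟩, ⟨by omega, by omega⟩, by ring_nf at he ⊢; omega⟩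

-- ===== VERDICT (by name: the statement is the Claim_ definition above) =====
theorem is_hypotenuse_spec : Claim_equal_is_hypotenuse := by
  intro n _
  exact is_hypotenuse_eq n
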